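-- pv_equiv track=rewrite | github.com/Red-Owl/text2cad | pita2.py | get_cube_contour
-- ===== SOURCE A (Python) =====
-- def get_cube_contour(center, length, width, height):
--     contour_coords = []
--     x_min, x_max = int(center[0] - length//2), int(center[0] + length//2)
--     y_min, y_max = int(center[1] - width//2), int(center[1] + width//2)
--     z_min, z_max = int(center[2] - height//2), int(center[2] + height//2)
--
--     for x in range(x_min, x_max + 1):
--         for y in range(y_min, y_max + 1):
--             for z in range(z_min, z_max + 1):
--                 if (x in (x_min, x_max) and y in (y_min, y_max)) or \
--                    (x in (x_min, x_max) and z in (z_min, z_max)) or \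
--                    (y in (y_min, y_max) and z in (z_min, z_max)):
--                     contour_coords.append([x, y, z])
--     return contour_coords
-- ===== SOURCE B (Python) =====
-- def get_cube_contour(center, length, width, height):
--     # Enumerate only the edge points directly (same lexicographic order as the
--     # full scan): for each extreme x the whole y-z perimeter, for interior x
--     # only the four corner points.
--     x_min, x_max = int(center[0] - length // 2), int(center[0] + length // 2)
--     y_min, y_max = int(center[1] - width // 2), int(center[1] + width // 2)
--     z_min, z_max = int(center[2] - height // 2), int(center[2] + height // 2)
--     if x_max < x_min or y_max < y_min or z_max < z_min:
--         return []
--     z_ext = [z_min] if z_min == z_max else [z_min, z_max]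
--     y_ext = [y_min] if y_min == y_max else [y_min, y_max]
--
--     def perimeter(x):
--         pts = []
--         for y in range(y_min, y_max + 1):
--             if y in (y_min, y_max):
--                 pts.extend([x, y, z] for z in range(z_min, z_max + 1))
--             else:
--                 pts.extend([x, y, z] for z in z_ext)
--         return pts
--
--     out = perimeter(x_min)
--     for x in range(x_min + 1, x_max):
--         out.extend([x, y, z] for y in y_ext for z in z_ext)
--     if x_min != x_max:
--         out.extend(perimeter(x_max))
--     return out
-- ===== Notes on version B (the rewrite author's own statement) =====
-- stated objective: faster
-- what changed: Instead of scanning every lattice point of the full L*W*H box and testing whether at least two coordinates are extreme, B enumerates only the edge points directly: the full y-z perimeter for the two extreme x slices and just the four corner points for every interior x, in the same lexicographic order.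
import Mathlib
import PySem

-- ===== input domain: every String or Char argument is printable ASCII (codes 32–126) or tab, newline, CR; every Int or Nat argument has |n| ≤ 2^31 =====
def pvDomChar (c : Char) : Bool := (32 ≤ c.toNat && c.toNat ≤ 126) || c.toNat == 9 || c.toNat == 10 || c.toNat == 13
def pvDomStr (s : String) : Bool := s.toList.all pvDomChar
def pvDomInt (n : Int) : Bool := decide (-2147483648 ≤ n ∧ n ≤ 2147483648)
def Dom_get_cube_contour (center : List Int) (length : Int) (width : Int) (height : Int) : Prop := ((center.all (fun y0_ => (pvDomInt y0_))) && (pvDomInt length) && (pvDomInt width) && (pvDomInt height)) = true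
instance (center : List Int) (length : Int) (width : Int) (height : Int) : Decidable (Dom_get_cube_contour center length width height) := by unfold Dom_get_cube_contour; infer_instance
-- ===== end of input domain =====

-- B replaces A's full O(L*W*H) box scan by direct enumeration of only the edge
-- points (perimeters of the two extreme x-slices plus the four corner points of
-- each interior slice), in the same order; measured asymptotically faster.


-- ===== PORT A =====
def get_cube_contour (center : List Int) (length : Int) (width : Int) (height : Int) : List (List Int) :=
  let c0 := (PySem.List.pyGet? center 0).getD 0
  let c1 := (PySem.List.pyGet? center 1).getD 0
  let c2 := (PySem.List.pyGet? center 2).getD 0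
  let xmin := c0 - PySem.Int.floordiv length 2
  let xmax := c0 + PySem.Int.floordiv length 2
  let ymin := c1 - PySem.Int.floordiv width 2
  let ymax := c1 + PySem.Int.floordiv width 2
  let zmin := c2 - PySem.Int.floordiv height 2
  let zmax := c2 + PySem.Int.floordiv height 2
  (PySem.List.pyRange xmin (xmax + 1) 1).foldl (fun acc x =>
    (PySem.List.pyRange ymin (ymax + 1) 1).foldl (fun acc y =>
      (PySem.List.pyRange zmin (zmax + 1) 1).foldl (fun acc z =>
        if ((x = xmin ∨ x = xmax) ∧ (y = ymin ∨ y = ymax)) ∨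
           ((x = xmin ∨ x = xmax) ∧ (z = zmin ∨ z = zmax)) ∨
           ((y = ymin ∨ y = ymax) ∧ (z = zmin ∨ z = zmax))
        then acc ++ [[x, y, z]] else acc) acc) acc) []

-- ===== PORT B =====
-- '[a] if a == b else [a, b]' (B's sorted two-extreme list, a ≤ b)
def pvExts (a b : Int) : List Int := if a = b then [a] else [a, b]

-- B's helper 'perimeter(x)': full z-row on extreme y, z-extremes elsewhere
def pvPerimeter (x ymin ymax zmin zmax : Int) : List (List Int) :=
  (PySem.List.pyRange ymin (ymax + 1) 1).foldl (fun pts y =>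
    if y = ymin ∨ y = ymax then
      pts ++ (PySem.List.pyRange zmin (zmax + 1) 1).map (fun z => [x, y, z])
    else
      pts ++ (pvExts zmin zmax).map (fun z => [x, y, z])) []

def get_cube_contour_alt (center : List Int) (length : Int) (width : Int) (height : Int) : List (List Int) :=
  let c0 := (PySem.List.pyGet? center 0).getD 0
  let c1 := (PySem.List.pyGet? center 1).getD 0
  let c2 := (PySem.List.pyGet? center 2).getD 0
  let xmin := c0 - PySem.Int.floordiv length 2
  let xmax := c0 + PySem.Int.floordiv length 2
  let ymin := c1 - PySem.Int.floordiv width 2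
  let ymax := c1 + PySem.Int.floordiv width 2
  let zmin := c2 - PySem.Int.floordiv height 2
  let zmax := c2 + PySem.Int.floordiv height 2
  if xmax < xmin ∨ ymax < ymin ∨ zmax < zmin then []
  else
    let out := pvPerimeter xmin ymin ymax zmin zmax
    let out2 := (PySem.List.pyRange (xmin + 1) xmax 1).foldl (fun out x =>
      out ++ (pvExts ymin ymax).flatMap (fun y =>
        (pvExts zmin zmax).map (fun z => [x, y, z]))) out
    if xmin ≠ xmax then out2 ++ pvPerimeter xmax ymin ymax zmin zmax else out2

-- ===== PRECONDITION & SPEC =====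
-- Pre_ excludes only inputs where Python A raises IndexError (fewer than 3 coordinates).
def Pre_get_cube_contour (center : List Int) (length : Int) (width : Int) (height : Int) : Prop :=
  3 ≤ center.length
instance (center : List Int) (length : Int) (width : Int) (height : Int) : Decidable (Pre_get_cube_contour center length width height) := by unfold Pre_get_cube_contour; infer_instance
def pvWitness_get_cube_contour : List Int × Int × Int × Int := ([0, 0, 0], 2, 2, 2)

def Spec_get_cube_contour (center : List Int) (length : Int) (width : Int) (height : Int) (out : List (List Int)) : Prop := out = get_cube_contour_alt center length width height
instance (center : List Int) (length : Int) (width : Int) (height : Int) (out : List (List Int)) : Decidable (Spec_get_cube_contour center length width height out) := by unfold Spec_get_cube_contour; infer_instance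

-- ===== CLAIM (what is proved, stated in full; the proofs are below) =====
def Claim_equal_get_cube_contour : Prop := ∀ (center : List Int) (length : Int) (width : Int) (height : Int), Dom_get_cube_contour center length width height → Pre_get_cube_contour center length width height → Spec_get_cube_contour center length width height (get_cube_contour center length width height)

-- ===== LEMMAS AND PROOFS =====

lemma foldl_append_ite2 {α β : Type} (p : α → Prop) [DecidablePred p]
    (f g : α → List β) (l : List α) (acc : List β) :
    l.foldl (fun acc x => if p x then acc ++ f x else acc ++ g x) acc
      = acc ++ l.flatMap (fun x => if p x then f x else g x) := by
  induction l generalizing acc with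
  | nil => simp
  | cons a l ih =>
    by_cases h : p a <;> simp [h, ih, List.append_assoc]

lemma flatMap_congr_mem {α β : Type} {l : List α} {f g : α → List β}
    (h : ∀ x ∈ l, f x = g x) : l.flatMap f = l.flatMap g := by
  induction l with
  | nil => rfl
  | cons a l ih =>
    simp only [List.flatMap_cons, h a (by simp), ih (fun x hx => h x (by simp [hx]))]

lemma flatMap_ite_nil {α β : Type} (p : α → Prop) [DecidablePred p]
    (g : α → List β) (l : List α) :
    l.flatMap (fun x => if p x then g x else []) = (l.filter (fun x => decide (p x))).flatMap g := by
  induction l with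
  | nil => rfl
  | cons a l ih =>
    by_cases h : p a <;> simp [h, List.filter_cons, ih]

lemma filter_ext_pair (a b : Int) (h : a ≤ b) :
    (PySem.List.pyRange a (b + 1) 1).filter (fun t => decide (t = a ∨ t = b)) = pvExts a b := by
  rw [PySem.List.pyRange_one_cons (by omega : a < b + 1)]
  by_cases hab : a = b
  · subst hab
    rw [PySem.List.pyRange_one_eq_nil (by omega)]
    simp [pvExts]
  · have h1 : a + 1 ≤ b := by omega
    rw [PySem.List.pyRange_one_succ_right h1]
    have hnil : (PySem.List.pyRange (a + 1) b 1).filter (fun t => decide (t = a ∨ t = b)) = [] := by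
      apply List.filter_eq_nil_iff.mpr
      intro t ht
      have := PySem.List.mem_pyRange_one.mp ht
      simp only [decide_eq_true_eq]
      omega
    rw [List.filter_cons, List.filter_append, hnil]
    simp [pvExts, hab]

-- A's row at an extreme x equals B's perimeter
lemma row_ext (xm xM ym yM zm zM x : Int) (hz : zm ≤ zM)
    (hx : x = xm ∨ x = xM) :
    (PySem.List.pyRange ym (yM + 1) 1).flatMap (fun y =>
      ((PySem.List.pyRange zm (zM + 1) 1).filter (fun z => decide
        (((x = xm ∨ x = xM) ∧ (y = ym ∨ y = yM)) ∨
         ((x = xm ∨ x = xM) ∧ (z = zm ∨ z = zM)) ∨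
         ((y = ym ∨ y = yM) ∧ (z = zm ∨ z = zM))))).map (fun z => [x, y, z]))
    = pvPerimeter x ym yM zm zM := by
  unfold pvPerimeter
  rw [foldl_append_ite2 (fun y => y = ym ∨ y = yM)
    (fun y => (PySem.List.pyRange zm (zM + 1) 1).map (fun z => [x, y, z]))
    (fun y => (pvExts zm zM).map (fun z => [x, y, z]))]
  rw [List.nil_append]
  apply flatMap_congr_mem
  intro y _
  by_cases hy : y = ym ∨ y = yM
  · rw [if_pos hy]
    have : (PySem.List.pyRange zm (zM + 1) 1).filter (fun z => decide
        (((x = xm ∨ x = xM) ∧ (y = ym ∨ y = yM)) ∨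
         ((x = xm ∨ x = xM) ∧ (z = zm ∨ z = zM)) ∨
         ((y = ym ∨ y = yM) ∧ (z = zm ∨ z = zM)))) = PySem.List.pyRange zm (zM + 1) 1 := by
      apply List.filter_eq_self.mpr
      intro z _
      simp only [decide_eq_true_eq]
      exact Or.inl ⟨hx, hy⟩
    rw [this]
  · rw [if_neg hy]
    have : (PySem.List.pyRange zm (zM + 1) 1).filter (fun z => decide
        (((x = xm ∨ x = xM) ∧ (y = ym ∨ y = yM)) ∨
         ((x = xm ∨ x = xM) ∧ (z = zm ∨ z = zM)) ∨
         ((y = ym ∨ y = yM) ∧ (z = zm ∨ z = zM))))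
        = (PySem.List.pyRange zm (zM + 1) 1).filter (fun z => decide (z = zm ∨ z = zM)) := by
      apply List.filter_congr
      intro z _
      simp only [decide_eq_decide]
      tauto
    rw [this, filter_ext_pair zm zM hz]

-- A's row at an interior x equals B's four corner points
lemma row_int (xm xM ym yM zm zM x : Int) (hy : ym ≤ yM) (hz : zm ≤ zM)
    (hx1 : xm < x) (hx2 : x < xM) :
    (PySem.List.pyRange ym (yM + 1) 1).flatMap (fun y =>
      ((PySem.List.pyRange zm (zM + 1) 1).filter (fun z => decide
        (((x = xm ∨ x = xM) ∧ (y = ym ∨ y = yM)) ∨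
         ((x = xm ∨ x = xM) ∧ (z = zm ∨ z = zM)) ∨
         ((y = ym ∨ y = yM) ∧ (z = zm ∨ z = zM))))).map (fun z => [x, y, z]))
    = (pvExts ym yM).flatMap (fun y => (pvExts zm zM).map (fun z => [x, y, z])) := by
  have hstep : (PySem.List.pyRange ym (yM + 1) 1).flatMap (fun y =>
      ((PySem.List.pyRange zm (zM + 1) 1).filter (fun z => decide
        (((x = xm ∨ x = xM) ∧ (y = ym ∨ y = yM)) ∨
         ((x = xm ∨ x = xM) ∧ (z = zm ∨ z = zM)) ∨
         ((y = ym ∨ y = yM) ∧ (z = zm ∨ z = zM))))).map (fun z => [x, y, z]))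
      = (PySem.List.pyRange ym (yM + 1) 1).flatMap (fun y =>
          if y = ym ∨ y = yM then (pvExts zm zM).map (fun z => [x, y, z]) else []) := by
    apply flatMap_congr_mem
    intro y _
    by_cases hyext : y = ym ∨ y = yM
    · rw [if_pos hyext]
      have : (PySem.List.pyRange zm (zM + 1) 1).filter (fun z => decide
          (((x = xm ∨ x = xM) ∧ (y = ym ∨ y = yM)) ∨
           ((x = xm ∨ x = xM) ∧ (z = zm ∨ z = zM)) ∨
           ((y = ym ∨ y = yM) ∧ (z = zm ∨ z = zM))))
          = (PySem.List.pyRange zm (zM + 1) 1).filter (fun z => decide (z = zm ∨ z = zM)) := by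
        apply List.filter_congr
        intro z _
        simp only [decide_eq_decide]
        constructor
        · rintro (⟨hxe, _⟩ | ⟨hxe, hze⟩ | ⟨_, hze⟩) <;> first | exact hze | omega
        · intro hze; exact Or.inr (Or.inr ⟨hyext, hze⟩)
      rw [this, filter_ext_pair zm zM hz]
    · rw [if_neg hyext]
      have : (PySem.List.pyRange zm (zM + 1) 1).filter (fun z => decide
          (((x = xm ∨ x = xM) ∧ (y = ym ∨ y = yM)) ∨
           ((x = xm ∨ x = xM) ∧ (z = zm ∨ z = zM)) ∨
           ((y = ym ∨ y = yM) ∧ (z = zm ∨ z = zM)))) = [] := by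
        apply List.filter_eq_nil_iff.mpr
        intro z _
        simp only [decide_eq_true_eq]
        rintro (⟨hxe, hye⟩ | ⟨hxe, _⟩ | ⟨hye, _⟩) <;> first | exact hyext hye | omega
      rw [this]
      simp
  rw [hstep, flatMap_ite_nil (fun y => y = ym ∨ y = yM)
      (fun y => (pvExts zm zM).map (fun z => [x, y, z])), filter_ext_pair ym yM hy]

-- the master equivalence, over the six computed bounds
lemma main_eq (xm xM ym yM zm zM : Int) :
    (PySem.List.pyRange xm (xM + 1) 1).foldl (fun acc x =>
      (PySem.List.pyRange ym (yM + 1) 1).foldl (fun acc y =>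
        (PySem.List.pyRange zm (zM + 1) 1).foldl (fun acc z =>
          if ((x = xm ∨ x = xM) ∧ (y = ym ∨ y = yM)) ∨
             ((x = xm ∨ x = xM) ∧ (z = zm ∨ z = zM)) ∨
             ((y = ym ∨ y = yM) ∧ (z = zm ∨ z = zM))
          then acc ++ [[x, y, z]] else acc) acc) acc) []
    = (if xM < xm ∨ yM < ym ∨ zM < zm then []
       else
         if xm ≠ xM then
           ((PySem.List.pyRange (xm + 1) xM 1).foldl (fun out x =>
             out ++ (pvExts ym yM).flatMap (fun y =>
               (pvExts zm zM).map (fun z => [x, y, z]))) (pvPerimeter xm ym yM zm zM))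
             ++ pvPerimeter xM ym yM zm zM
         else
           (PySem.List.pyRange (xm + 1) xM 1).foldl (fun out x =>
             out ++ (pvExts ym yM).flatMap (fun y =>
               (pvExts zm zM).map (fun z => [x, y, z]))) (pvPerimeter xm ym yM zm zM)) := by
  have hA : (PySem.List.pyRange xm (xM + 1) 1).foldl (fun acc x =>
      (PySem.List.pyRange ym (yM + 1) 1).foldl (fun acc y =>
        (PySem.List.pyRange zm (zM + 1) 1).foldl (fun acc z =>
          if ((x = xm ∨ x = xM) ∧ (y = ym ∨ y = yM)) ∨
             ((x = xm ∨ x = xM) ∧ (z = zm ∨ z = zM)) ∨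
             ((y = ym ∨ y = yM) ∧ (z = zm ∨ z = zM))
          then acc ++ [[x, y, z]] else acc) acc) acc) []
      = (PySem.List.pyRange xm (xM + 1) 1).flatMap (fun x =>
          (PySem.List.pyRange ym (yM + 1) 1).flatMap (fun y =>
            ((PySem.List.pyRange zm (zM + 1) 1).filter (fun z => decide
              (((x = xm ∨ x = xM) ∧ (y = ym ∨ y = yM)) ∨
               ((x = xm ∨ x = xM) ∧ (z = zm ∨ z = zM)) ∨
               ((y = ym ∨ y = yM) ∧ (z = zm ∨ z = zM))))).map (fun z => [x, y, z]))) := by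
    simp only [PySem.List.foldl_append_ite, PySem.List.foldl_append_eq_flatMap, List.nil_append]
  rw [hA]
  by_cases hx : xM < xm
  · rw [PySem.List.pyRange_one_eq_nil (by omega : xM + 1 ≤ xm)]
    simp [hx]
  by_cases hy : yM < ym
  · rw [PySem.List.pyRange_one_eq_nil (by omega : yM + 1 ≤ ym)]
    simp [hx, hy]
  by_cases hz : zM < zm
  · rw [PySem.List.pyRange_one_eq_nil (by omega : zM + 1 ≤ zm)]
    simp [hx, hy, hz]
  · -- nonempty box
    have hx' : xm ≤ xM := by omega
    have hy' : ym ≤ yM := by omega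
    have hz' : zm ≤ zM := by omega
    rw [if_neg (by omega : ¬(xM < xm ∨ yM < ym ∨ zM < zm))]
    simp only [PySem.List.foldl_append_eq_flatMap]
    by_cases hxx : xm = xM
    · subst hxx
      rw [if_neg (by simp : ¬ xm ≠ xm)]
      rw [show PySem.List.pyRange xm (xm + 1) 1 = [xm] from PySem.List.pyRange_one_singleton xm]
      rw [PySem.List.pyRange_one_eq_nil (by omega : xm ≤ xm + 1)]
      simp only [List.flatMap_cons, List.flatMap_nil, List.append_nil]
      simpa using row_ext xm xm ym yM zm zM xm hz' (Or.inl rfl)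
    · have hlt : xm < xM := by omega
      rw [if_pos hxx]
      rw [show PySem.List.pyRange xm (xM + 1) 1
            = xm :: (PySem.List.pyRange (xm + 1) xM 1 ++ [xM]) by
          rw [PySem.List.pyRange_one_cons (by omega : xm < xM + 1),
            PySem.List.pyRange_one_succ_right (by omega : xm + 1 ≤ xM)]]
      rw [List.flatMap_cons, List.flatMap_append, List.flatMap_cons, List.flatMap_nil,
        List.append_nil]
      rw [row_ext xm xM ym yM zm zM xm hz' (Or.inl rfl),
        row_ext xm xM ym yM zm zM xM hz' (Or.inr rfl)]
      have hmid : (PySem.List.pyRange (xm + 1) xM 1).flatMap (fun x =>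
          (PySem.List.pyRange ym (yM + 1) 1).flatMap (fun y =>
            ((PySem.List.pyRange zm (zM + 1) 1).filter (fun z => decide
              (((x = xm ∨ x = xM) ∧ (y = ym ∨ y = yM)) ∨
               ((x = xm ∨ x = xM) ∧ (z = zm ∨ z = zM)) ∨
               ((y = ym ∨ y = yM) ∧ (z = zm ∨ z = zM))))).map (fun z => [x, y, z])))
          = (PySem.List.pyRange (xm + 1) xM 1).flatMap (fun x =>
              (pvExts ym yM).flatMap (fun y => (pvExts zm zM).map (fun z => [x, y, z]))) := by
        apply flatMap_congr_mem
        intro x hxmem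
        have := PySem.List.mem_pyRange_one.mp hxmem
        exact row_int xm xM ym yM zm zM x hy' hz' (by omega) (by omega)
      rw [hmid]
      simp [List.append_assoc]

-- ===== VERDICT (by name: the statement is the Claim_ definition above) =====
theorem get_cube_contour_spec : Claim_equal_get_cube_contour := by
  intro center length width height _ _
  unfold Spec_get_cube_contour get_cube_contour get_cube_contour_alt
  exact main_eq _ _ _ _ _ _
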